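-- pv_equiv track=rewrite | github.com/love-mitsuha/python_source_code | CodeForces/implementation/1016D3D.py | search
-- ===== SOURCE A (Python) =====
-- def search(length,r,c,d):
--     if d==1:
--         return r,c
--     dt=1<<(length-1)
--     dd=dt*dt
--     if d>3*dd:
--         return search(length-1,r,c+dt,d-3*dd)
--     elif d>2*dd:
--         return search(length-1,r+dt,c,d-2*dd)
--     elif d>dd:
--         return search(length-1,r+dt,c+dt,d-dd)
--     else:
--         return search(length-1,r,c,d)
-- ===== SOURCE B (Python) =====
-- def search(length, r, c, d):
--     while d != 1:
--         dt = 1 << (length - 1)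
--         dd = dt * dt
--         if d > 3 * dd:
--             c += dt
--             d -= 3 * dd
--         elif d > 2 * dd:
--             r += dt
--             d -= 2 * dd
--         elif d > dd:
--             r += dt
--             c += dt
--             d -= dd
--         length -= 1
--     return r, c
-- ===== Notes on version B (the rewrite author's own statement) =====
-- stated objective: simpler
-- what changed: Replaced the four-way tail recursion by a single iterative while-loop that updates (r,c,d) in place and decrements length, removing recursion (and Python's recursion-depth limit) entirely.
import Mathlib
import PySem

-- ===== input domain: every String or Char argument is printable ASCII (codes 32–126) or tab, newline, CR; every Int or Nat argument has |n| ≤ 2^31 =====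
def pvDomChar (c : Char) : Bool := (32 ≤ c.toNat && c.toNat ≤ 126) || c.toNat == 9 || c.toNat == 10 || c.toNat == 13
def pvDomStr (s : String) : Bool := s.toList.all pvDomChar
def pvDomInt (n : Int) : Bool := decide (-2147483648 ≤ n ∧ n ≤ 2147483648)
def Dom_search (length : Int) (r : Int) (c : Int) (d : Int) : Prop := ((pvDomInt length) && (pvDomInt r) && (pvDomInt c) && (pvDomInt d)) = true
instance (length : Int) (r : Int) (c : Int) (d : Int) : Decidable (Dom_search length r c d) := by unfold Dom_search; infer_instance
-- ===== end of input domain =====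

-- B replaces the four-way tail recursion by one iterative loop over the levels
-- updating (r, c, d) in place; objective: simpler (no recursion).


-- ===== PORT A =====
-- Literal port of A's recursion.  When d ≠ 1 and length ≤ 0, Python raises
-- ValueError (negative shift count); these inputs are outside Pre_search and the
-- port returns (r, c) there only to be total.
def search (length : Int) (r : Int) (c : Int) (d : Int) : Int × Int :=
  if d = 1 then (r, c)
  else if length ≤ 0 then (r, c)   -- Python raises ValueError here (excluded by Pre_search)
  else
    let dt : Int := 2 ^ (length - 1).toNat
    let dd := dt * dt
    if d > 3 * dd then search (length - 1) r (c + dt) (d - 3 * dd)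
    else if d > 2 * dd then search (length - 1) (r + dt) c (d - 2 * dd)
    else if d > dd then search (length - 1) (r + dt) (c + dt) (d - dd)
    else search (length - 1) r c d
termination_by length.toNat
decreasing_by all_goals omega

-- ===== PORT B =====
-- One iteration of Source B's while-loop body at level k (dt = 1 << k); the d = 1
-- guard is the loop condition: once d reaches 1 the state no longer changes.
def qstep (st : Int × Int × Int) (k : Nat) : Int × Int × Int :=
  if st.2.2 = 1 then st
  else
    let dt : Int := 2 ^ k
    let dd := dt * dt
    if st.2.2 > 3 * dd then (st.1, st.2.1 + dt, st.2.2 - 3 * dd)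
    else if st.2.2 > 2 * dd then (st.1 + dt, st.2.1, st.2.2 - 2 * dd)
    else if st.2.2 > dd then (st.1 + dt, st.2.1 + dt, st.2.2 - dd)
    else st

-- Source B's loop runs with length-1, length-2, …, 0 as shift amounts.
def search_alt (length : Int) (r : Int) (c : Int) (d : Int) : Int × Int :=
  let s := ((List.range length.toNat).reverse).foldl qstep (r, c, d)
  (s.1, s.2.1)

-- ===== PRECONDITION & SPEC =====
-- Pre_search is exactly the set of inputs on which the Python A returns normally:
-- 1 ≤ d ≤ 4^length (for length ≤ 0 this forces d = 1, the immediate-return case);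
-- everywhere else the recursion exhausts length and 1 << (length-1) raises ValueError.
def Pre_search (length : Int) (r : Int) (c : Int) (d : Int) : Prop :=
  1 ≤ d ∧ d ≤ 4 ^ length.toNat
instance (length : Int) (r : Int) (c : Int) (d : Int) : Decidable (Pre_search length r c d) := by unfold Pre_search; infer_instance
def pvWitness_search : Int × Int × Int × Int := (2, 0, 0, 7)

def Spec_search (length : Int) (r : Int) (c : Int) (d : Int) (out : Int × Int) : Prop := out = search_alt length r c d
instance (length : Int) (r : Int) (c : Int) (d : Int) (out : Int × Int) : Decidable (Spec_search length r c d out) := by unfold Spec_search; infer_instance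

-- ===== CLAIM (what is proved, stated in full; the proofs are below) =====
def Claim_equal_search : Prop := ∀ (length : Int) (r : Int) (c : Int) (d : Int), Dom_search length r c d → Pre_search length r c d → Spec_search length r c d (search length r c d)

-- ===== LEMMAS AND PROOFS =====

-- Once d = 1 the loop body never changes the state.
theorem foldl_qstep_one (l : List Nat) (r c : Int) :
    l.foldl qstep (r, c, 1) = (r, c, 1) := by
  induction l with
  | nil => rfl
  | cons k t ih => simpa [qstep] using ih

-- Peeling the first (largest) level off the fold.
theorem foldl_qstep_peel (m : Nat) (st : Int × Int × Int) :
    ((List.range (m + 1)).reverse).foldl qstep st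
      = ((List.range m).reverse).foldl qstep (qstep st m) := by
  simp [List.range_succ]

theorem search_eq_alt (n : Nat) (length r c d : Int)
    (hn : length.toNat = n) (h1 : 1 ≤ d) (h4 : d ≤ 4 ^ n) :
    search length r c d = search_alt length r c d := by
  induction n generalizing length r c d with
  | zero =>
    have hd : d = 1 := by simp at h4; omega
    subst hd
    simp [search, search_alt, hn]
  | succ m ih =>
    by_cases hd : d = 1
    · subst hd
      have h0 : ((List.range length.toNat).reverse).foldl qstep (r, c, 1) = (r, c, 1) :=
        foldl_qstep_one _ r c
      simp [search, search_alt, h0]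
    · have hlen : ¬ length ≤ 0 := by omega
      have htn : (length - 1).toNat = m := by omega
      have hpow : ((2 : Int) ^ m) * ((2 : Int) ^ m) = 4 ^ m := by
        rw [show (4 : Int) = 2 * 2 from rfl, mul_pow]
      have hps : (4 : Int) ^ (m + 1) = 4 * 4 ^ m := by ring
      have e1 : search_alt length r c d
          = ((((List.range m).reverse).foldl qstep (qstep (r, c, d) m)).1,
             (((List.range m).reverse).foldl qstep (qstep (r, c, d) m)).2.1) := by
        simp only [search_alt, hn, foldl_qstep_peel]
      have e2 : ∀ r' c' d' : Int, search_alt (length - 1) r' c' d'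
          = ((((List.range m).reverse).foldl qstep (r', c', d')).1,
             (((List.range m).reverse).foldl qstep (r', c', d')).2.1) := by
        intro r' c' d'; simp only [search_alt, htn]
      rw [search]
      simp only [hd, if_false, hlen, htn, hpow]
      by_cases h3 : d > 3 * 4 ^ m
      · have hq : qstep (r, c, d) m = (r, c + 2 ^ m, d - 3 * 4 ^ m) := by
          simp [qstep, hd, hpow, h3]
        rw [if_pos h3, ih _ _ _ _ htn (by omega) (by omega), e2, e1, hq]
      · rw [if_neg h3]
        by_cases h2 : d > 2 * 4 ^ m
        · have hq : qstep (r, c, d) m = (r + 2 ^ m, c, d - 2 * 4 ^ m) := by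
            simp [qstep, hd, hpow, h3, h2]
          rw [if_pos h2, ih _ _ _ _ htn (by omega) (by omega), e2, e1, hq]
        · rw [if_neg h2]
          by_cases hq1 : d > 4 ^ m
          · have hq : qstep (r, c, d) m = (r + 2 ^ m, c + 2 ^ m, d - 4 ^ m) := by
              simp [qstep, hd, hpow, h3, h2, hq1]
            rw [if_pos hq1, ih _ _ _ _ htn (by omega) (by omega), e2, e1, hq]
          · have hq : qstep (r, c, d) m = (r, c, d) := by
              simp [qstep, hd, hpow, h3, h2, hq1]
            rw [if_neg hq1, ih _ _ _ _ htn (by omega) (by omega), e2, e1, hq]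

-- ===== VERDICT (by name: the statement is the Claim_ definition above) =====
theorem search_spec : Claim_equal_search := by
  intro length r c d _ hpre
  exact search_eq_alt length.toNat length r c d rfl hpre.1 hpre.2
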